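-- pv_equiv track=rewrite | github.com/itepifanio/sistemas-embarcados | servidor-a/server_logic.py | get_queue_info
-- ===== SOURCE A (Python) =====
-- def calc_queue_status(cameras, idx=0):
--     """
--     Função recursiva que determina o nível de ocupação em uma fila;
--     TODO: explicar o pensamento por trás
--     """
--
--     if idx == len(cameras) or not cameras[idx]:
--         return idx
--     else:
--         return calc_queue_status(cameras, idx+1)
--
-- def get_queue_info(cam_ips, source):
--     cameras = []
--     default_lvl = False
--
--     # adicionar as cameras na ordem correta para detectar o status
--     for ip in cam_ips:
--         if ip in source.keys():
--             cameras.append(source[ip])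
--         else:
--             cameras.append(default_lvl)
--
--
--     # verificar o nível da fila através das informações das cameras
--     return calc_queue_status(cameras)
-- ===== SOURCE B (Python) =====
-- def get_queue_info(cam_ips, source):
--     # single fused early-exit pass: length of the leading run of truthy camera values
--     for i, ip in enumerate(cam_ips):
--         if not source.get(ip, False):
--             return i
--     return len(cam_ips)
-- ===== Notes on version B (the rewrite author's own statement) =====
-- stated objective: simpler
-- what changed: Replaced the build-a-cameras-list pass plus recursive index-scanning helper by one fused early-exit enumerate loop using dict.get with default False.
import Mathlib
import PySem

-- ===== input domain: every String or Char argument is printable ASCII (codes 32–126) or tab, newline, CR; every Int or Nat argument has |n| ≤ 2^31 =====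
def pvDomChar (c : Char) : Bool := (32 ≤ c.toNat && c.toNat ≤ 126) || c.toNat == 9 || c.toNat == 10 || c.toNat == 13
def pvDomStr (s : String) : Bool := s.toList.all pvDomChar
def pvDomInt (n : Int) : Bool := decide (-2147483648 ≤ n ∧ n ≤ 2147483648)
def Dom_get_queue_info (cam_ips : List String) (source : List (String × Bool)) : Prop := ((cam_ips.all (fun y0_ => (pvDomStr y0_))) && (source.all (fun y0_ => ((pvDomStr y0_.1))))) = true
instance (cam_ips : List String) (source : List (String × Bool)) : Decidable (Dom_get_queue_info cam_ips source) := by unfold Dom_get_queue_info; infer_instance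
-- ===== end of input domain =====

-- B replaces A's build-list-then-recurse with one fused early-exit pass; objective: simpler.
-- ===== PORT A =====
-- recursive helper calc_queue_status(cameras, idx)
def calc_queue_status (cameras : List Bool) (idx : Nat) : Int :=
  if idx = cameras.length ∨ cameras.getD idx false = false then
    (idx : Int)
  else
    calc_queue_status cameras (idx + 1)
termination_by cameras.length - idx
decreasing_by
  rename_i h
  push_neg at h
  have hlt : idx < cameras.length := by
    by_contra hc
    exact h.2 (by rw [List.getD_eq_getElem?_getD, List.getElem?_eq_none (Nat.le_of_not_lt hc)]; rfl)
  omega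

def get_queue_info (cam_ips : List String) (source : List (String × Bool)) : Int :=
  let cameras := cam_ips.foldl (fun acc ip =>
    if (PySem.Dict.mk source).contains ip then
      acc ++ [((PySem.Dict.mk source).get? ip).getD false]
    else
      acc ++ [false]) []
  calc_queue_status cameras 0

-- ===== PORT B =====
-- the enumerate loop of Source B: i counts processed prefix; early exit on falsy value
def altLoop (source : List (String × Bool)) : List String → Nat → Int
  | [], i => (i : Int)
  | ip :: rest, i =>
      if (PySem.Dict.mk source).getD ip false then altLoop source rest (i + 1)
      else (i : Int)

def get_queue_info_alt (cam_ips : List String) (source : List (String × Bool)) : Int :=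
  altLoop source cam_ips 0

-- ===== PRECONDITION & SPEC =====
def Spec_get_queue_info (cam_ips : List String) (source : List (String × Bool)) (out : Int) : Prop := out = get_queue_info_alt cam_ips source
instance (cam_ips : List String) (source : List (String × Bool)) (out : Int) : Decidable (Spec_get_queue_info cam_ips source out) := by unfold Spec_get_queue_info; infer_instance

-- ===== CLAIM (what is proved, stated in full; the proofs are below) =====
def Claim_equal_get_queue_info : Prop := ∀ (cam_ips : List String) (source : List (String × Bool)), Dom_get_queue_info cam_ips source → Spec_get_queue_info cam_ips source (get_queue_info cam_ips source)

-- ===== LEMMAS AND PROOFS =====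

-- ===== VERDICT (by name: the statement is the Claim_ definition above) =====
-- the value each camera contributes
def camVal (source : List (String × Bool)) (ip : String) : Bool :=
  (PySem.Dict.mk source).getD ip false

lemma cameras_eq_map (cam_ips : List String) (source : List (String × Bool)) (acc : List Bool) :
    cam_ips.foldl (fun acc ip =>
      if (PySem.Dict.mk source).contains ip then
        acc ++ [((PySem.Dict.mk source).get? ip).getD false]
      else
        acc ++ [false]) acc = acc ++ cam_ips.map (camVal source) := by
  induction cam_ips generalizing acc with
  | nil => simp
  | cons ip rest ih =>
      simp only [List.foldl_cons, List.map_cons]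
      by_cases h : (PySem.Dict.mk source).contains ip = true
      · rw [if_pos h, ih]
        simp [camVal, PySem.Dict.getD]
      · rw [if_neg h, ih]
        have h2 : (PySem.Dict.mk source).get? ip = none := by
          simp only [PySem.Dict.contains, List.any_eq_true, not_exists] at h
          simp only [PySem.Dict.get?, Option.map_eq_none_iff, List.find?_eq_none]
          intro x hx hp
          exact absurd (by exact ⟨hx, hp⟩ : x ∈ source ∧ (x.1 == ip) = true) (by simpa using h x)
        simp [camVal, PySem.Dict.getD, h2]

lemma calc_eq_altLoop (source : List (String × Bool)) :
    ∀ (rest : List String) (pre : List Bool),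
    calc_queue_status (pre ++ rest.map (camVal source)) pre.length = altLoop source rest pre.length := by
  intro rest
  induction rest with
  | nil =>
      intro pre
      rw [calc_queue_status]
      simp [altLoop]
  | cons ip tail ih =>
      intro pre
      rw [calc_queue_status]
      have hget : (pre ++ (camVal source ip :: tail.map (camVal source))).getD pre.length false
          = camVal source ip := by
        rw [List.getD_eq_getElem?_getD]
        simp
      have hlen : pre.length ≠ (pre ++ (camVal source ip :: tail.map (camVal source))).length := by
        simp
      by_cases hv : camVal source ip = true
      · have hcond : ¬ (pre.length = (pre ++ List.map (camVal source) (ip :: tail)).length ∨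
            (pre ++ List.map (camVal source) (ip :: tail)).getD pre.length false = false) := by
          simp only [List.map_cons]
          push_neg
          exact ⟨by simpa using hlen, by rw [hget, hv]; simp⟩
        rw [if_neg hcond]
        have h2 := ih (pre ++ [camVal source ip])
        simp only [List.length_append, List.length_cons, List.length_nil,
          List.append_assoc, List.cons_append, List.nil_append] at h2
        simp only [List.map_cons]
        rw [h2]
        simp only [camVal] at hv
        simp [altLoop, hv]
      · simp at hv
        have hcond : pre.length = (pre ++ List.map (camVal source) (ip :: tail)).length ∨
            (pre ++ List.map (camVal source) (ip :: tail)).getD pre.length false = false := by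
          right
          simp only [List.map_cons]
          rw [hget, hv]
        rw [if_pos hcond]
        simp [altLoop, camVal] at hv ⊢
        simp [hv]

-- ===== VERDICT (by name: the statement is the Claim_ definition above) =====
theorem get_queue_info_spec : Claim_equal_get_queue_info := by
  intro cam_ips source _
  unfold Spec_get_queue_info get_queue_info get_queue_info_alt
  rw [cameras_eq_map]
  simpa using calc_eq_altLoop source cam_ips []
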